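-- pv_equiv track=rewrite | github.com/lr13964976003/agent | outputs/2025-12-23-14-29-48/generate_complete_llm_dag.py | generate_stage
-- ===== SOURCE A (Python) =====
-- def generate_attention_block(stage, layer, gpu_pair, color):
--     """Generate complete attention block with all submodules"""
--     nodes = []
--     edges = []
--
--     # QKV Linear splits
--     for gpu in gpu_pair:
--         nodes.append(f'layer{layer}_qkv_{gpu} [label="QKV Linear\\nLayer {layer}\\nGPU:{gpu}\\nInput:[4,2048,8192]\\nOutput:[4,2048,12288]" fillcolor="{color}" shape=rectangle]')
--
--     # QKV All-Reduce
--     nodes.append(f'qkv_ar_{layer}_{stage} [label="All-Reduce\\nQKV\\nLayer {layer}\\nGPU:{gpu_pair}" fillcolor=lightblue shape=ellipse]')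
--
--     # Attention computation (this would be the actual attention mechanism)
--     for gpu in gpu_pair:
--         nodes.append(f'layer{layer}_attn_{gpu} [label="Self-Attention\\nLayer {layer}\\nGPU:{gpu}\\nInput:[4,2048,12288]\\nOutput:[4,2048,8192]" fillcolor="{color}" shape=rectangle]')
--
--     # Attention output projection
--     for gpu in gpu_pair:
--         nodes.append(f'layer{layer}_attn_out_{gpu} [label="Attention Output\\nLayer {layer}\\nGPU:{gpu}\\nInput:[4,2048,8192]\\nOutput:[4,2048,8192]" fillcolor="{color}" shape=rectangle]')
--
--     # Attention All-Reduce
--     nodes.append(f'attn_out_ar_{layer}_{stage} [label="All-Reduce\\nAttention\\nLayer {layer}\\nGPU:{gpu_pair}" fillcolor=lightblue shape=ellipse]')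
--
--     return nodes, edges
--
-- def generate_ffn_block(stage, layer, gpu_pair, color):
--     """Generate complete FFN block with all submodules"""
--     nodes = []
--     edges = []
--
--     # FFN Gate
--     for gpu in gpu_pair:
--         nodes.append(f'layer{layer}_ffn_gate_{gpu} [label="FFN Gate\\nLayer {layer}\\nGPU:{gpu}\\nInput:[4,2048,8192]\\nOutput:[4,2048,28672]" fillcolor="{color}" shape=rectangle]')
--
--     # FFN Up
--     for gpu in gpu_pair:
--         nodes.append(f'layer{layer}_ffn_up_{gpu} [label="FFN Up\\nLayer {layer}\\nGPU:{gpu}\\nInput:[4,2048,8192]\\nOutput:[4,2048,28672]" fillcolor="{color}" shape=rectangle]')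
--
--     # FFN All-Reduce
--     nodes.append(f'ffn_ar_{layer}_{stage} [label="All-Reduce\\nFFN\\nLayer {layer}\\nGPU:{gpu_pair}" fillcolor=lightblue shape=ellipse]')
--
--     # FFN Down
--     for gpu in gpu_pair:
--         nodes.append(f'layer{layer}_ffn_down_{gpu} [label="FFN Down\\nLayer {layer}\\nGPU:{gpu}\\nInput:[4,2048,28672]\\nOutput:[4,2048,8192]" fillcolor="{color}" shape=rectangle]')
--
--     # FFN Output All-Reduce
--     nodes.append(f'ffn_out_ar_{layer}_{stage} [label="All-Reduce\\nFFN Output\\nLayer {layer}\\nGPU:{gpu_pair}" fillcolor=lightblue shape=ellipse]')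
--
--     return nodes, edges
--
-- def generate_stage(stage_id, start_layer, end_layer, gpu_pair, color):
--     """Generate complete stage with all layers"""
--     nodes = []
--     edges = []
--
--     # Stage header
--     stage_label = f"Stage {stage_id}: GPUs {gpu_pair}\\nLayers {start_layer}-{end_layer}"
--     nodes.append(f'subgraph cluster_stage{stage_id} {{')
--     nodes.append(f'\tbgcolor=lightgray label="{stage_label}" style=rounded')
--
--     # Input split for first layer
--     if stage_id == 0:
--         nodes.append(f'\tsplit_0 [label="Input Split\\n[batch_size=4, seq_len=2048, hidden=4096]" fillcolor=lightyellow shape=parallelogram]')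
--
--         # Embedding layers
--         for gpu in gpu_pair:
--             nodes.append(f'\tlayer0_embed_{gpu} [label="Embedding\\nGPU:{gpu}\\nInput:[4,2048]\\nOutput:[4,2048,8192]" fillcolor="{color}" shape=rectangle]')
--         nodes.append(f'\tembed_ag_0 [label="All-Gather\\nEmbedding\\nGPU:{gpu_pair}" fillcolor=lightblue shape=ellipse]')
--
--     # Generate all layers
--     for layer in range(start_layer, end_layer + 1):
--         # Attention block
--         attn_nodes, attn_edges = generate_attention_block(stage_id, layer, gpu_pair, color)
--         nodes.extend([f'\t{node}' for node in attn_nodes])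
--
--         # FFN block
--         ffn_nodes, ffn_edges = generate_ffn_block(stage_id, layer, gpu_pair, color)
--         nodes.extend([f'\t{node}' for node in ffn_nodes])
--
--     nodes.append('}')
--
--     return nodes, edges
-- ===== SOURCE B (Python) =====
-- def generate_stage(stage_id, start_layer, end_layer, gpu_pair, color):
--     """Generate complete stage with all layers (table-driven)."""
--     gp = "[" + ", ".join(str(g) for g in gpu_pair) + "]"
--     # each layer's nodes, in emission order: ("gpu", key, title, in_dim, out_dim)
--     # for one rectangle per GPU, ("ar", key, title) for a single all-reduce ellipse
--     LAYER_SPEC = [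
--         ("gpu", "qkv", "QKV Linear", "8192", "12288"),
--         ("ar", "qkv_ar", "QKV"),
--         ("gpu", "attn", "Self-Attention", "12288", "8192"),
--         ("gpu", "attn_out", "Attention Output", "8192", "8192"),
--         ("ar", "attn_out_ar", "Attention"),
--         ("gpu", "ffn_gate", "FFN Gate", "8192", "28672"),
--         ("gpu", "ffn_up", "FFN Up", "8192", "28672"),
--         ("ar", "ffn_ar", "FFN"),
--         ("gpu", "ffn_down", "FFN Down", "28672", "8192"),
--         ("ar", "ffn_out_ar", "FFN Output"),
--     ]
--     nodes = [
--         f'subgraph cluster_stage{stage_id} {{',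
--         f'\tbgcolor=lightgray label="Stage {stage_id}: GPUs {gp}\\nLayers {start_layer}-{end_layer}" style=rounded',
--     ]
--     if stage_id == 0:
--         nodes.append('\tsplit_0 [label="Input Split\\n[batch_size=4, seq_len=2048, hidden=4096]" fillcolor=lightyellow shape=parallelogram]')
--         nodes += [f'\tlayer0_embed_{g} [label="Embedding\\nGPU:{g}\\nInput:[4,2048]\\nOutput:[4,2048,8192]" fillcolor="{color}" shape=rectangle]'
--                   for g in gpu_pair]
--         nodes.append(f'\tembed_ag_0 [label="All-Gather\\nEmbedding\\nGPU:{gp}" fillcolor=lightblue shape=ellipse]')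
--     for layer in range(start_layer, end_layer + 1):
--         for spec in LAYER_SPEC:
--             if spec[0] == "gpu":
--                 _, key, title, din, dout = spec
--                 nodes += [f'\tlayer{layer}_{key}_{g} [label="{title}\\nLayer {layer}\\nGPU:{g}\\nInput:[4,2048,{din}]\\nOutput:[4,2048,{dout}]" fillcolor="{color}" shape=rectangle]'
--                           for g in gpu_pair]
--             else:
--                 _, key, title = spec
--                 nodes.append(f'\t{key}_{layer}_{stage_id} [label="All-Reduce\\n{title}\\nLayer {layer}\\nGPU:{gp}" fillcolor=lightblue shape=ellipse]')
--     nodes.append('}')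
--     return nodes, []
-- ===== Notes on version B (the rewrite author's own statement) =====
-- stated objective: simpler
-- what changed: Replaces A's three helper functions with hardcoded sequential emission blocks by a single table-driven loop over a declarative per-layer node spec (key, title, dims, per-GPU vs all-reduce), computing the GPU-list repr once.
import Mathlib
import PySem

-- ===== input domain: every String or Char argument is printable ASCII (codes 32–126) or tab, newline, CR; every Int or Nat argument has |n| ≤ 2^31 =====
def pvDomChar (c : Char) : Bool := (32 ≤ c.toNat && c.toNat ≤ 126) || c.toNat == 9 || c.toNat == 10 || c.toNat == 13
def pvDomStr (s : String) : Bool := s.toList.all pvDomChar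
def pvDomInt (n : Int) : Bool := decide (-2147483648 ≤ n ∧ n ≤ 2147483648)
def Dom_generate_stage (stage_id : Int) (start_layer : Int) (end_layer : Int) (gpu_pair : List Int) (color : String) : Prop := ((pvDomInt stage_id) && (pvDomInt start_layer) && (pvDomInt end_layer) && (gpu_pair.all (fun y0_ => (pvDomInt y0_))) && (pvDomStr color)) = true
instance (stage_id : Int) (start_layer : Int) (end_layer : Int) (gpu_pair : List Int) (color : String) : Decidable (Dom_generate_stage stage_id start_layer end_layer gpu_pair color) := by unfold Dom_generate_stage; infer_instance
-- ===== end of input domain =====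

-- B replaces A's three hardcoded sequential emission blocks by one table-driven
-- traversal of a declarative per-layer node spec (objective: simpler).

-- ===== PORT A =====

-- Python repr of a list of ints, f"{gpu_pair}" (exact for int lists)
def pvReprA (gs : List Int) : String :=
  "[" ++ PySem.Str.join ", " (gs.map PySem.Int.toStr) ++ "]"

def generate_attention_block (stage : Int) (layer : Int) (gpu_pair : List Int) (color : String) : List String × List String :=
  let nodes : List String := []
  let edges : List String := []
  let nodes := gpu_pair.foldl (fun acc gpu => acc ++
    ["layer" ++ PySem.Int.toStr layer ++ "_qkv_" ++ PySem.Int.toStr gpu ++ " [label=\"QKV Linear\\nLayer " ++ PySem.Int.toStr layer ++ "\\nGPU:" ++ PySem.Int.toStr gpu ++ "\\nInput:[4,2048,8192]\\nOutput:[4,2048,12288]\" fillcolor=\"" ++ color ++ "\" shape=rectangle]"]) nodes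
  let nodes := nodes ++
    ["qkv_ar_" ++ PySem.Int.toStr layer ++ "_" ++ PySem.Int.toStr stage ++ " [label=\"All-Reduce\\nQKV\\nLayer " ++ PySem.Int.toStr layer ++ "\\nGPU:" ++ pvReprA gpu_pair ++ "\" fillcolor=lightblue shape=ellipse]"]
  let nodes := gpu_pair.foldl (fun acc gpu => acc ++
    ["layer" ++ PySem.Int.toStr layer ++ "_attn_" ++ PySem.Int.toStr gpu ++ " [label=\"Self-Attention\\nLayer " ++ PySem.Int.toStr layer ++ "\\nGPU:" ++ PySem.Int.toStr gpu ++ "\\nInput:[4,2048,12288]\\nOutput:[4,2048,8192]\" fillcolor=\"" ++ color ++ "\" shape=rectangle]"]) nodes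
  let nodes := gpu_pair.foldl (fun acc gpu => acc ++
    ["layer" ++ PySem.Int.toStr layer ++ "_attn_out_" ++ PySem.Int.toStr gpu ++ " [label=\"Attention Output\\nLayer " ++ PySem.Int.toStr layer ++ "\\nGPU:" ++ PySem.Int.toStr gpu ++ "\\nInput:[4,2048,8192]\\nOutput:[4,2048,8192]\" fillcolor=\"" ++ color ++ "\" shape=rectangle]"]) nodes
  let nodes := nodes ++
    ["attn_out_ar_" ++ PySem.Int.toStr layer ++ "_" ++ PySem.Int.toStr stage ++ " [label=\"All-Reduce\\nAttention\\nLayer " ++ PySem.Int.toStr layer ++ "\\nGPU:" ++ pvReprA gpu_pair ++ "\" fillcolor=lightblue shape=ellipse]"]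
  (nodes, edges)

def generate_ffn_block (stage : Int) (layer : Int) (gpu_pair : List Int) (color : String) : List String × List String :=
  let nodes : List String := []
  let edges : List String := []
  let nodes := gpu_pair.foldl (fun acc gpu => acc ++
    ["layer" ++ PySem.Int.toStr layer ++ "_ffn_gate_" ++ PySem.Int.toStr gpu ++ " [label=\"FFN Gate\\nLayer " ++ PySem.Int.toStr layer ++ "\\nGPU:" ++ PySem.Int.toStr gpu ++ "\\nInput:[4,2048,8192]\\nOutput:[4,2048,28672]\" fillcolor=\"" ++ color ++ "\" shape=rectangle]"]) nodes
  let nodes := gpu_pair.foldl (fun acc gpu => acc ++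
    ["layer" ++ PySem.Int.toStr layer ++ "_ffn_up_" ++ PySem.Int.toStr gpu ++ " [label=\"FFN Up\\nLayer " ++ PySem.Int.toStr layer ++ "\\nGPU:" ++ PySem.Int.toStr gpu ++ "\\nInput:[4,2048,8192]\\nOutput:[4,2048,28672]\" fillcolor=\"" ++ color ++ "\" shape=rectangle]"]) nodes
  let nodes := nodes ++
    ["ffn_ar_" ++ PySem.Int.toStr layer ++ "_" ++ PySem.Int.toStr stage ++ " [label=\"All-Reduce\\nFFN\\nLayer " ++ PySem.Int.toStr layer ++ "\\nGPU:" ++ pvReprA gpu_pair ++ "\" fillcolor=lightblue shape=ellipse]"]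
  let nodes := gpu_pair.foldl (fun acc gpu => acc ++
    ["layer" ++ PySem.Int.toStr layer ++ "_ffn_down_" ++ PySem.Int.toStr gpu ++ " [label=\"FFN Down\\nLayer " ++ PySem.Int.toStr layer ++ "\\nGPU:" ++ PySem.Int.toStr gpu ++ "\\nInput:[4,2048,28672]\\nOutput:[4,2048,8192]\" fillcolor=\"" ++ color ++ "\" shape=rectangle]"]) nodes
  let nodes := nodes ++
    ["ffn_out_ar_" ++ PySem.Int.toStr layer ++ "_" ++ PySem.Int.toStr stage ++ " [label=\"All-Reduce\\nFFN Output\\nLayer " ++ PySem.Int.toStr layer ++ "\\nGPU:" ++ pvReprA gpu_pair ++ "\" fillcolor=lightblue shape=ellipse]"]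
  (nodes, edges)

def generate_stage (stage_id : Int) (start_layer : Int) (end_layer : Int) (gpu_pair : List Int) (color : String) : List String × List String :=
  let nodes : List String := []
  let edges : List String := []
  let stage_label := "Stage " ++ PySem.Int.toStr stage_id ++ ": GPUs " ++ pvReprA gpu_pair ++ "\\nLayers " ++ PySem.Int.toStr start_layer ++ "-" ++ PySem.Int.toStr end_layer
  let nodes := nodes ++ ["subgraph cluster_stage" ++ PySem.Int.toStr stage_id ++ " {"]
  let nodes := nodes ++ ["\tbgcolor=lightgray label=\"" ++ stage_label ++ "\" style=rounded"]
  let nodes := if stage_id = 0 then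
      let nodes := nodes ++ ["\tsplit_0 [label=\"Input Split\\n[batch_size=4, seq_len=2048, hidden=4096]\" fillcolor=lightyellow shape=parallelogram]"]
      let nodes := gpu_pair.foldl (fun acc gpu => acc ++
        ["\tlayer0_embed_" ++ PySem.Int.toStr gpu ++ " [label=\"Embedding\\nGPU:" ++ PySem.Int.toStr gpu ++ "\\nInput:[4,2048]\\nOutput:[4,2048,8192]\" fillcolor=\"" ++ color ++ "\" shape=rectangle]"]) nodes
      nodes ++ ["\tembed_ag_0 [label=\"All-Gather\\nEmbedding\\nGPU:" ++ pvReprA gpu_pair ++ "\" fillcolor=lightblue shape=ellipse]"]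
    else nodes
  let nodes := (PySem.List.pyRange start_layer (end_layer + 1) 1).foldl (fun acc layer =>
    let attn := generate_attention_block stage_id layer gpu_pair color
    let acc := acc ++ attn.1.map (fun node => "\t" ++ node)
    let ffn := generate_ffn_block stage_id layer gpu_pair color
    acc ++ ffn.1.map (fun node => "\t" ++ node)) nodes
  let nodes := nodes ++ ["}"]
  (nodes, edges)

-- ===== PORT B =====

inductive PvNodeSpec where
  | gpu : String → String → String → String → PvNodeSpec   -- key, title, in_dim, out_dim
  | ar : String → String → PvNodeSpec                      -- key, title
  deriving DecidableEq, Repr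

def pvLayerSpec : List PvNodeSpec :=
  [ .gpu "qkv" "QKV Linear" "8192" "12288",
    .ar "qkv_ar" "QKV",
    .gpu "attn" "Self-Attention" "12288" "8192",
    .gpu "attn_out" "Attention Output" "8192" "8192",
    .ar "attn_out_ar" "Attention",
    .gpu "ffn_gate" "FFN Gate" "8192" "28672",
    .gpu "ffn_up" "FFN Up" "8192" "28672",
    .ar "ffn_ar" "FFN",
    .gpu "ffn_down" "FFN Down" "28672" "8192",
    .ar "ffn_out_ar" "FFN Output" ]

def pvSpecNodes (stage_id : Int) (layer : Int) (gp : String) (gpu_pair : List Int) (color : String) : PvNodeSpec → List String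
  | .gpu key title din dout =>
      gpu_pair.map (fun g => "\tlayer" ++ PySem.Int.toStr layer ++ "_" ++ key ++ "_" ++ PySem.Int.toStr g ++ " [label=\"" ++ title ++ "\\nLayer " ++ PySem.Int.toStr layer ++ "\\nGPU:" ++ PySem.Int.toStr g ++ "\\nInput:[4,2048," ++ din ++ "]\\nOutput:[4,2048," ++ dout ++ "]\" fillcolor=\"" ++ color ++ "\" shape=rectangle]")
  | .ar key title =>
      ["\t" ++ key ++ "_" ++ PySem.Int.toStr layer ++ "_" ++ PySem.Int.toStr stage_id ++ " [label=\"All-Reduce\\n" ++ title ++ "\\nLayer " ++ PySem.Int.toStr layer ++ "\\nGPU:" ++ gp ++ "\" fillcolor=lightblue shape=ellipse]"]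

def generate_stage_alt (stage_id : Int) (start_layer : Int) (end_layer : Int) (gpu_pair : List Int) (color : String) : List String × List String :=
  let gp := "[" ++ PySem.Str.join ", " (gpu_pair.map PySem.Int.toStr) ++ "]"
  let nodes : List String :=
    [ "subgraph cluster_stage" ++ PySem.Int.toStr stage_id ++ " {",
      "\tbgcolor=lightgray label=\"Stage " ++ PySem.Int.toStr stage_id ++ ": GPUs " ++ gp ++ "\\nLayers " ++ PySem.Int.toStr start_layer ++ "-" ++ PySem.Int.toStr end_layer ++ "\" style=rounded" ]
  let nodes := if stage_id = 0 then
      nodes ++ ["\tsplit_0 [label=\"Input Split\\n[batch_size=4, seq_len=2048, hidden=4096]\" fillcolor=lightyellow shape=parallelogram]"]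
            ++ gpu_pair.map (fun g => "\tlayer0_embed_" ++ PySem.Int.toStr g ++ " [label=\"Embedding\\nGPU:" ++ PySem.Int.toStr g ++ "\\nInput:[4,2048]\\nOutput:[4,2048,8192]\" fillcolor=\"" ++ color ++ "\" shape=rectangle]")
            ++ ["\tembed_ag_0 [label=\"All-Gather\\nEmbedding\\nGPU:" ++ gp ++ "\" fillcolor=lightblue shape=ellipse]"]
    else nodes
  let nodes := nodes ++ (PySem.List.pyRange start_layer (end_layer + 1) 1).flatMap
    (fun layer => pvLayerSpec.flatMap (pvSpecNodes stage_id layer gp gpu_pair color))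
  (nodes ++ ["}"], [])

-- ===== PRECONDITION & SPEC =====
def Spec_generate_stage (stage_id : Int) (start_layer : Int) (end_layer : Int) (gpu_pair : List Int) (color : String) (out : List String × List String) : Prop := out = generate_stage_alt stage_id start_layer end_layer gpu_pair color
instance (stage_id : Int) (start_layer : Int) (end_layer : Int) (gpu_pair : List Int) (color : String) (out : List String × List String) : Decidable (Spec_generate_stage stage_id start_layer end_layer gpu_pair color out) := by unfold Spec_generate_stage; infer_instance

-- ===== CLAIM (what is proved, stated in full; the proofs are below) =====
def Claim_equal_generate_stage : Prop := ∀ (stage_id : Int) (start_layer : Int) (end_layer : Int) (gpu_pair : List Int) (color : String), Dom_generate_stage stage_id start_layer end_layer gpu_pair color → Spec_generate_stage stage_id start_layer end_layer gpu_pair color (generate_stage stage_id start_layer end_layer gpu_pair color)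

-- ===== LEMMAS AND PROOFS =====

@[simp] theorem pv_str_qkv (L G C : String) :
    "\t" ++ ("layer" ++ L ++ "_qkv_" ++ G ++ " [label=\"QKV Linear\\nLayer " ++ L ++ "\\nGPU:" ++ G ++ "\\nInput:[4,2048,8192]\\nOutput:[4,2048,12288]\" fillcolor=\"" ++ C ++ "\" shape=rectangle]")
    = "\tlayer" ++ L ++ "_" ++ "qkv" ++ "_" ++ G ++ " [label=\"" ++ "QKV Linear" ++ "\\nLayer " ++ L ++ "\\nGPU:" ++ G ++ "\\nInput:[4,2048," ++ "8192" ++ "]\\nOutput:[4,2048," ++ "12288" ++ "]\" fillcolor=\"" ++ C ++ "\" shape=rectangle]" := by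
  apply String.toList_injective; simp

@[simp] theorem pv_str_attn (L G C : String) :
    "\t" ++ ("layer" ++ L ++ "_attn_" ++ G ++ " [label=\"Self-Attention\\nLayer " ++ L ++ "\\nGPU:" ++ G ++ "\\nInput:[4,2048,12288]\\nOutput:[4,2048,8192]\" fillcolor=\"" ++ C ++ "\" shape=rectangle]")
    = "\tlayer" ++ L ++ "_" ++ "attn" ++ "_" ++ G ++ " [label=\"" ++ "Self-Attention" ++ "\\nLayer " ++ L ++ "\\nGPU:" ++ G ++ "\\nInput:[4,2048," ++ "12288" ++ "]\\nOutput:[4,2048," ++ "8192" ++ "]\" fillcolor=\"" ++ C ++ "\" shape=rectangle]" := by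
  apply String.toList_injective; simp

@[simp] theorem pv_str_attn_out (L G C : String) :
    "\t" ++ ("layer" ++ L ++ "_attn_out_" ++ G ++ " [label=\"Attention Output\\nLayer " ++ L ++ "\\nGPU:" ++ G ++ "\\nInput:[4,2048,8192]\\nOutput:[4,2048,8192]\" fillcolor=\"" ++ C ++ "\" shape=rectangle]")
    = "\tlayer" ++ L ++ "_" ++ "attn_out" ++ "_" ++ G ++ " [label=\"" ++ "Attention Output" ++ "\\nLayer " ++ L ++ "\\nGPU:" ++ G ++ "\\nInput:[4,2048," ++ "8192" ++ "]\\nOutput:[4,2048," ++ "8192" ++ "]\" fillcolor=\"" ++ C ++ "\" shape=rectangle]" := by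
  apply String.toList_injective; simp

@[simp] theorem pv_str_ffn_gate (L G C : String) :
    "\t" ++ ("layer" ++ L ++ "_ffn_gate_" ++ G ++ " [label=\"FFN Gate\\nLayer " ++ L ++ "\\nGPU:" ++ G ++ "\\nInput:[4,2048,8192]\\nOutput:[4,2048,28672]\" fillcolor=\"" ++ C ++ "\" shape=rectangle]")
    = "\tlayer" ++ L ++ "_" ++ "ffn_gate" ++ "_" ++ G ++ " [label=\"" ++ "FFN Gate" ++ "\\nLayer " ++ L ++ "\\nGPU:" ++ G ++ "\\nInput:[4,2048," ++ "8192" ++ "]\\nOutput:[4,2048," ++ "28672" ++ "]\" fillcolor=\"" ++ C ++ "\" shape=rectangle]" := by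
  apply String.toList_injective; simp

@[simp] theorem pv_str_ffn_up (L G C : String) :
    "\t" ++ ("layer" ++ L ++ "_ffn_up_" ++ G ++ " [label=\"FFN Up\\nLayer " ++ L ++ "\\nGPU:" ++ G ++ "\\nInput:[4,2048,8192]\\nOutput:[4,2048,28672]\" fillcolor=\"" ++ C ++ "\" shape=rectangle]")
    = "\tlayer" ++ L ++ "_" ++ "ffn_up" ++ "_" ++ G ++ " [label=\"" ++ "FFN Up" ++ "\\nLayer " ++ L ++ "\\nGPU:" ++ G ++ "\\nInput:[4,2048," ++ "8192" ++ "]\\nOutput:[4,2048," ++ "28672" ++ "]\" fillcolor=\"" ++ C ++ "\" shape=rectangle]" := by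
  apply String.toList_injective; simp

@[simp] theorem pv_str_ffn_down (L G C : String) :
    "\t" ++ ("layer" ++ L ++ "_ffn_down_" ++ G ++ " [label=\"FFN Down\\nLayer " ++ L ++ "\\nGPU:" ++ G ++ "\\nInput:[4,2048,28672]\\nOutput:[4,2048,8192]\" fillcolor=\"" ++ C ++ "\" shape=rectangle]")
    = "\tlayer" ++ L ++ "_" ++ "ffn_down" ++ "_" ++ G ++ " [label=\"" ++ "FFN Down" ++ "\\nLayer " ++ L ++ "\\nGPU:" ++ G ++ "\\nInput:[4,2048," ++ "28672" ++ "]\\nOutput:[4,2048," ++ "8192" ++ "]\" fillcolor=\"" ++ C ++ "\" shape=rectangle]" := by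
  apply String.toList_injective; simp

@[simp] theorem pv_str_qkv_ar (L S GP : String) :
    "\t" ++ ("qkv_ar_" ++ L ++ "_" ++ S ++ " [label=\"All-Reduce\\nQKV\\nLayer " ++ L ++ "\\nGPU:" ++ GP ++ "\" fillcolor=lightblue shape=ellipse]")
    = "\t" ++ "qkv_ar" ++ "_" ++ L ++ "_" ++ S ++ " [label=\"All-Reduce\\n" ++ "QKV" ++ "\\nLayer " ++ L ++ "\\nGPU:" ++ GP ++ "\" fillcolor=lightblue shape=ellipse]" := by
  apply String.toList_injective; simp

@[simp] theorem pv_str_attn_out_ar (L S GP : String) :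
    "\t" ++ ("attn_out_ar_" ++ L ++ "_" ++ S ++ " [label=\"All-Reduce\\nAttention\\nLayer " ++ L ++ "\\nGPU:" ++ GP ++ "\" fillcolor=lightblue shape=ellipse]")
    = "\t" ++ "attn_out_ar" ++ "_" ++ L ++ "_" ++ S ++ " [label=\"All-Reduce\\n" ++ "Attention" ++ "\\nLayer " ++ L ++ "\\nGPU:" ++ GP ++ "\" fillcolor=lightblue shape=ellipse]" := by
  apply String.toList_injective; simp

@[simp] theorem pv_str_ffn_ar (L S GP : String) :
    "\t" ++ ("ffn_ar_" ++ L ++ "_" ++ S ++ " [label=\"All-Reduce\\nFFN\\nLayer " ++ L ++ "\\nGPU:" ++ GP ++ "\" fillcolor=lightblue shape=ellipse]")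
    = "\t" ++ "ffn_ar" ++ "_" ++ L ++ "_" ++ S ++ " [label=\"All-Reduce\\n" ++ "FFN" ++ "\\nLayer " ++ L ++ "\\nGPU:" ++ GP ++ "\" fillcolor=lightblue shape=ellipse]" := by
  apply String.toList_injective; simp

@[simp] theorem pv_str_ffn_out_ar (L S GP : String) :
    "\t" ++ ("ffn_out_ar_" ++ L ++ "_" ++ S ++ " [label=\"All-Reduce\\nFFN Output\\nLayer " ++ L ++ "\\nGPU:" ++ GP ++ "\" fillcolor=lightblue shape=ellipse]")
    = "\t" ++ "ffn_out_ar" ++ "_" ++ L ++ "_" ++ S ++ " [label=\"All-Reduce\\n" ++ "FFN Output" ++ "\\nLayer " ++ L ++ "\\nGPU:" ++ GP ++ "\" fillcolor=lightblue shape=ellipse]" := by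
  apply String.toList_injective; simp

@[simp] theorem pv_str_header (S GP A1 A2 : String) :
    "\tbgcolor=lightgray label=\"" ++ ("Stage " ++ S ++ ": GPUs " ++ GP ++ "\\nLayers " ++ A1 ++ "-" ++ A2) ++ "\" style=rounded"
    = "\tbgcolor=lightgray label=\"Stage " ++ S ++ ": GPUs " ++ GP ++ "\\nLayers " ++ A1 ++ "-" ++ A2 ++ "\" style=rounded" := by
  apply String.toList_injective; simp

-- one layer of A (tab-prefixed attention block then FFN block) equals one layer of B's table
theorem pv_layer_eq (stage_id layer : Int) (gpu_pair : List Int) (color : String) :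
    (generate_attention_block stage_id layer gpu_pair color).1.map (fun node => "\t" ++ node)
      ++ (generate_ffn_block stage_id layer gpu_pair color).1.map (fun node => "\t" ++ node)
    = pvLayerSpec.flatMap (pvSpecNodes stage_id layer ("[" ++ PySem.Str.join ", " (gpu_pair.map PySem.Int.toStr) ++ "]") gpu_pair color) := by
  simp only [generate_attention_block, generate_ffn_block, pvLayerSpec, pvSpecNodes, pvReprA,
    PySem.List.foldl_append_singleton_eq_map, List.flatMap_cons, List.flatMap_nil,
    List.map_append, List.map_map, List.map_cons, List.map_nil, Function.comp_def,
    List.append_assoc, List.nil_append, List.append_nil, List.cons_append,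
    pv_str_qkv, pv_str_attn, pv_str_attn_out, pv_str_ffn_gate, pv_str_ffn_up, pv_str_ffn_down,
    pv_str_qkv_ar, pv_str_attn_out_ar, pv_str_ffn_ar, pv_str_ffn_out_ar]

-- ===== VERDICT (by name: the statement is the Claim_ definition above) =====
theorem generate_stage_spec : Claim_equal_generate_stage := by
  intro stage_id start_layer end_layer gpu_pair color _
  unfold Spec_generate_stage generate_stage generate_stage_alt
  simp only [pvReprA, List.append_assoc, PySem.List.foldl_append_singleton_eq_map,
    PySem.List.foldl_append_eq_flatMap, pv_layer_eq, pv_str_header,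
    List.nil_append, List.cons_append]
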